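-- pv_equiv track=rewrite | github.com/IrynLoza/algorithms | sum_concatenation.py | sum_concatenation
-- ===== SOURCE A (Python) =====
-- def sum_concatenation(a, b):
--     """Return concatenated string"""
--
--     result = ''
--     main = []
--     second = []
--
--     if len(a) >= len(b):
--         main = a
--         second = b
--     else:
--         main = b
--         second = a
--
--     second_length = len(second)
--
--     i = 0
--     while second_length > 0:
--         temp = int(main[len(main)-(1+i)]) + int(second[len(second)-(1+i)])
--         result = f'{temp}{result}'
--         second_length-= 1
--         i+= 1
--
--     rest_nums = main[:(len(main)-len(second))]
--     result = f'{rest_nums}{result}'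
--
--     return result
-- ===== SOURCE B (Python) =====
-- def sum_concatenation(a, b):
--     """Return concatenated string"""
--     main, second = (a, b) if len(a) >= len(b) else (b, a)
--     off = len(main) - len(second)
--     parts = [str(main[:off])]
--     for i in range(off, len(main)):
--         parts.append(str(int(main[i]) + int(second[i - off])))
--     return ''.join(parts)
-- ===== Notes on version B (the rewrite author's own statement) =====
-- stated objective: alternative
-- what changed: Replaces A's backward while-loop that prepends each digit-pair sum to an accumulator string plus a separate prefix concatenation with a single forward pass that maps the paired indices to stringified sums and joins prefix and sums once at the end.
import Mathlib
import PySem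

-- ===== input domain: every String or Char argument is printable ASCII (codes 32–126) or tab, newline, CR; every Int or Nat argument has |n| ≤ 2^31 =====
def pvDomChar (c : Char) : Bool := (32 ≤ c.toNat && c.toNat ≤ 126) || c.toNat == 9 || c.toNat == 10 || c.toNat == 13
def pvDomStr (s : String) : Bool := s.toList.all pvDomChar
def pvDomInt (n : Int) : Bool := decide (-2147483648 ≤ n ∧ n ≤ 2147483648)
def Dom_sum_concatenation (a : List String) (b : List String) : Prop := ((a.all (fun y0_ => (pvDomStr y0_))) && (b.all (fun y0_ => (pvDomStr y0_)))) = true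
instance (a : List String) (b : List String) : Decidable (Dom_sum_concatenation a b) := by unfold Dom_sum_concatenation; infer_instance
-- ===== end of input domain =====

-- B fuses A's backward digit-pairing loop and the separate prefix concatenation into one
-- forward pass joined at the end (objective: alternative decomposition, same cost).
-- Note: A's `f'{rest_nums}…'` formats a LIST, so the result embeds a Python list repr;
-- both ports reproduce that via the hand-written repr helpers below (exact on Dom's
-- printable-ASCII + tab/newline/CR character set).

-- ===== PORT A =====
-- hand port of Python's repr of one str (quote choice and \\ \' \t \n \r escapes;
-- exact for strings of printable ASCII plus tab/newline/CR, i.e. on Dom)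
def pyReprChar (q : Char) (c : Char) : List Char :=
  if c = '\\' then ['\\', '\\']
  else if c = q then ['\\', q]
  else if c = Char.ofNat 9 then ['\\', 't']
  else if c = Char.ofNat 10 then ['\\', 'n']
  else if c = Char.ofNat 13 then ['\\', 'r']
  else [c]

def pyReprStr (s : String) : String :=
  let cs := s.toList
  let q : Char := if cs.contains '\'' && !(cs.contains '\"') then '\"' else '\''
  String.ofList ((q :: cs.flatMap (pyReprChar q)) ++ [q])

-- hand port of Python's str/repr of a list of str: '[' + ', '.join(repr each) + ']'
def pyReprList (xs : List String) : String :=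
  "[" ++ PySem.Str.join ", " (xs.map pyReprStr) ++ "]"

-- A's while loop: fuel = second_length, i the running index, result the accumulator
def pyLoopA (main second : List String) : Nat → Nat → String → String
  | 0, _, result => result
  | Nat.succ sl, i, result =>
      let temp : Int :=
        (PySem.Int.ofStr? ((PySem.List.pyGet? main ((main.length : Int) - (1 + (i : Int)))).getD "")).getD 0
        + (PySem.Int.ofStr? ((PySem.List.pyGet? second ((second.length : Int) - (1 + (i : Int)))).getD "")).getD 0
      pyLoopA main second sl (i + 1) (PySem.Int.toStr temp ++ result)

def sum_concatenation (a : List String) (b : List String) : String :=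
  let main := if b.length ≤ a.length then a else b
  let second := if b.length ≤ a.length then b else a
  let result := pyLoopA main second second.length 0 ""
  let rest_nums := PySem.List.slice main none (some ((main.length : Int) - (second.length : Int)))
  pyReprList rest_nums ++ result

-- ===== PORT B =====
def sum_concatenation_alt (a : List String) (b : List String) : String :=
  let main := if b.length ≤ a.length then a else b
  let second := if b.length ≤ a.length then b else a
  let off : Int := (main.length : Int) - (second.length : Int)
  let parts : List String :=
    pyReprList (PySem.List.slice main none (some off)) ::
      (PySem.List.pyRange off (main.length : Int) 1).map (fun x =>
        PySem.Int.toStr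
          ((PySem.Int.ofStr? ((PySem.List.pyGet? main x).getD "")).getD 0
            + (PySem.Int.ofStr? ((PySem.List.pyGet? second (x - off)).getD "")).getD 0))
  PySem.Str.join "" parts

-- ===== PRECONDITION & SPEC =====
-- A raises ValueError iff some element that gets paired (the last min-length elements of
-- each list) does not parse as a Python int; Pre_ excludes exactly those inputs.
def Pre_sum_concatenation (a : List String) (b : List String) : Prop :=
  (∀ s ∈ a.drop (a.length - min a.length b.length), (PySem.Int.ofStr? s).isSome = true) ∧
  (∀ s ∈ b.drop (b.length - min a.length b.length), (PySem.Int.ofStr? s).isSome = true)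
instance (a : List String) (b : List String) : Decidable (Pre_sum_concatenation a b) := by
  unfold Pre_sum_concatenation; infer_instance

def pvWitness_sum_concatenation : List String × List String := (["1", "27", "3"], [" -4", "5"])

def Spec_sum_concatenation (a : List String) (b : List String) (out : String) : Prop := out = sum_concatenation_alt a b
instance (a : List String) (b : List String) (out : String) : Decidable (Spec_sum_concatenation a b out) := by unfold Spec_sum_concatenation; infer_instance

-- ===== CLAIM (what is proved, stated in full; the proofs are below) =====
def Claim_equal_sum_concatenation : Prop := ∀ (a : List String) (b : List String), Dom_sum_concatenation a b → Pre_sum_concatenation a b → Spec_sum_concatenation a b (sum_concatenation a b)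

-- ===== LEMMAS AND PROOFS =====

-- the per-position summand of B, as a function of the (Int) index into main
def pvTermB (m s : List String) (x : Int) : String :=
  PySem.Int.toStr
    ((PySem.Int.ofStr? ((PySem.List.pyGet? m x).getD "")).getD 0
      + (PySem.Int.ofStr? ((PySem.List.pyGet? s (x - ((m.length : Int) - (s.length : Int)))).getD "")).getD 0)

lemma join_empty_cons (x : String) (l : List String) :
    PySem.Str.join "" (x :: l) = x ++ PySem.Str.join "" l := by
  cases l with
  | nil => simp [PySem.Str.join, PySem.Chars.join, List.intercalate]
  | cons y l => simp [PySem.Str.join, PySem.Chars.join_cons_cons]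

lemma join_empty_append (u v : List String) :
    PySem.Str.join "" (u ++ v) = PySem.Str.join "" u ++ PySem.Str.join "" v := by
  induction u with
  | nil => simp [PySem.Str.join, PySem.Chars.join, List.intercalate]
  | cons x u ih => simp [join_empty_cons, ih, String.append_assoc]

lemma pyLoopA_eq (m s : List String) (sl i : Nat) (acc : String) :
    pyLoopA m s sl i acc =
      PySem.Str.join ""
        ((PySem.List.pyRange ((m.length : Int) - sl - i) ((m.length : Int) - i) 1).map (pvTermB m s))
        ++ acc := by
  induction sl generalizing i acc with
  | zero =>
      rw [PySem.List.pyRange_one_eq_nil (by omega)]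
      simp [pyLoopA, PySem.Str.join, PySem.Chars.join, List.intercalate]
  | succ sl ih =>
      rw [pyLoopA, ih]
      rw [show ((m.length : Int) - i) = ((m.length : Int) - (i + 1)) + 1 by omega,
        PySem.List.pyRange_one_succ_right (by push_cast; omega)]
      rw [List.map_append, join_empty_append]
      simp only [List.map_cons, List.map_nil]
      rw [join_empty_cons]
      have hm : ((m.length : Int) - ((i : Int) + 1)) = (m.length : Int) - (1 + (i : Int)) := by ring
      have hs : ((m.length : Int) - ((i : Int) + 1)) - ((m.length : Int) - (s.length : Int))
          = (s.length : Int) - (1 + (i : Int)) := by ring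
      have hr : ((m.length : Int) - ((sl : Int) + 1) - (i : Int))
          = (m.length : Int) - (sl : Int) - ((i : Int) + 1) := by ring
      simp only [pvTermB, hm, Nat.cast_add, Nat.cast_one, hr]
      simp [PySem.Str.join, PySem.Chars.join, List.intercalate, String.append_assoc]

lemma main_eq (m s : List String) :
    pyReprList (PySem.List.slice m none (some ((m.length : Int) - (s.length : Int)))) ++ pyLoopA m s s.length 0 "" =
    PySem.Str.join "" (pyReprList (PySem.List.slice m none (some ((m.length : Int) - (s.length : Int)))) ::
      (PySem.List.pyRange ((m.length : Int) - (s.length : Int)) ((m.length : Int)) 1).map (pvTermB m s)) := by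
  rw [join_empty_cons, pyLoopA_eq]
  norm_num

theorem sum_concatenation_eq (a b : List String) :
    sum_concatenation a b = sum_concatenation_alt a b := by
  by_cases h : b.length ≤ a.length
  · simp only [sum_concatenation, sum_concatenation_alt, if_pos h]
    exact main_eq a b
  · simp only [sum_concatenation, sum_concatenation_alt, if_neg h]
    exact main_eq b a

-- ===== VERDICT (by name: the statement is the Claim_ definition above) =====
theorem sum_concatenation_spec : Claim_equal_sum_concatenation := by
  intro a b _ _
  exact sum_concatenation_eq a b
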